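-- pv_equiv track=rewrite | github.com/drogers0/clonehunter | src/clonehunter/cli/commands/scan.py | merge_globs
-- ===== SOURCE A (Python) =====
-- def merge_globs(
--     base_include: list[str],
--     base_exclude: list[str],
--     cli_include: list[str],
--     cli_exclude: list[str],
-- ) -> tuple[list[str], list[str]]:
--     include = _dedupe(base_include + cli_include)
--     exclude = _dedupe(base_exclude + cli_exclude)
--
--     # CLI entries override conflicting pyproject entries.
--     for pattern in cli_include:
--         exclude = [value for value in exclude if value != pattern]
--     for pattern in cli_exclude:
--         include = [value for value in include if value != pattern]
--     return include, exclude
--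
-- def _dedupe(values: list[str]) -> list[str]:
--     seen: set[str] = set()
--     deduped: list[str] = []
--     for value in values:
--         if value in seen:
--             continue
--         seen.add(value)
--         deduped.append(value)
--     return deduped
-- ===== SOURCE B (Python) =====
-- def merge_globs(
--     base_include: list[str],
--     base_exclude: list[str],
--     cli_include: list[str],
--     cli_exclude: list[str],
-- ) -> tuple[list[str], list[str]]:
--     def pick(merged: list[str], banned: list[str]) -> list[str]:
--         return [v for i, v in enumerate(merged)
--                 if v not in merged[:i] and v not in banned]
--
--     return (
--         pick(base_include + cli_include, cli_exclude),
--         pick(base_exclude + cli_exclude, cli_include),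
--     )
-- ===== Notes on version B (the rewrite author's own statement) =====
-- stated objective: simpler
-- what changed: Replaces A's seen-set dedupe fold plus one full filtering rescan per CLI pattern with a single stateless comprehension per list that keeps a value iff it is its first occurrence (not in the prefix slice merged[:i]) and not in the cross-wired CLI override list.
import Mathlib
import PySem

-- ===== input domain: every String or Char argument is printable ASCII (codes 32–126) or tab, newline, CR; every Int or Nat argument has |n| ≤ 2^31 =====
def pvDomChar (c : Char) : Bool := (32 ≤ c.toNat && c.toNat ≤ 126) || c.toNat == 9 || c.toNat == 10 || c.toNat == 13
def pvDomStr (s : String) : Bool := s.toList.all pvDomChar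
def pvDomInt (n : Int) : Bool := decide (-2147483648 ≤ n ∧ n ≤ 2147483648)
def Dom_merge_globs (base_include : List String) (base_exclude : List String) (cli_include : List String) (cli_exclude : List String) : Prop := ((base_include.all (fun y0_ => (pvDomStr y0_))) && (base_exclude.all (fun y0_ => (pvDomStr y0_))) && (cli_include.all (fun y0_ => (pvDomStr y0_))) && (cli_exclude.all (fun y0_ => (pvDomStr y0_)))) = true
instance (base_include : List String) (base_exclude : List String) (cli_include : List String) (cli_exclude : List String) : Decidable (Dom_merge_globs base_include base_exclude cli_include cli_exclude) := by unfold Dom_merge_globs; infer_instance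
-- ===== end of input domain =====

-- B replaces A's seen-set dedupe fold and per-pattern rescans with one stateless prefix-slice comprehension per list (simpler; same results).


-- ===== PORT A =====
-- _dedupe: set 'seen' + list 'deduped', appending first occurrences.
def pyDedupe (values : List String) : List String :=
  (values.foldl
    (fun st value =>
      if PySem.Set.contains st.1 value then st
      else (PySem.Set.add st.1 value, st.2 ++ [value]))
    ((PySem.Set.empty : PySem.Set String), ([] : List String))).2

def merge_globs (base_include : List String) (base_exclude : List String) (cli_include : List String) (cli_exclude : List String) : List (List String) :=
  let include0 := pyDedupe (base_include ++ cli_include)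
  let exclude0 := pyDedupe (base_exclude ++ cli_exclude)
  let exclude1 := cli_include.foldl (fun ex pattern => ex.filter (fun value => value != pattern)) exclude0
  let include1 := cli_exclude.foldl (fun inc pattern => inc.filter (fun value => value != pattern)) include0
  [include1, exclude1]

-- ===== PORT B =====
-- comprehension: keep v at index i iff v is not in merged[:i] (first occurrence) and not banned.
def mergePick (merged : List String) (banned : List String) : List String :=
  (PySem.List.enumerate merged 0).filterMap (fun p =>
    if !((PySem.List.slice merged none (some p.1)).contains p.2) && !(banned.contains p.2)
    then some p.2 else none)

def merge_globs_alt (base_include : List String) (base_exclude : List String) (cli_include : List String) (cli_exclude : List String) : List (List String) :=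
  [mergePick (base_include ++ cli_include) cli_exclude,
   mergePick (base_exclude ++ cli_exclude) cli_include]

-- ===== PRECONDITION & SPEC =====
def Spec_merge_globs (base_include : List String) (base_exclude : List String) (cli_include : List String) (cli_exclude : List String) (out : List (List String)) : Prop := out = merge_globs_alt base_include base_exclude cli_include cli_exclude
instance (base_include : List String) (base_exclude : List String) (cli_include : List String) (cli_exclude : List String) (out : List (List String)) : Decidable (Spec_merge_globs base_include base_exclude cli_include cli_exclude out) := by unfold Spec_merge_globs; infer_instance

-- ===== CLAIM (what is proved, stated in full; the proofs are below) =====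
def Claim_equal_merge_globs : Prop := ∀ (base_include : List String) (base_exclude : List String) (cli_include : List String) (cli_exclude : List String), Dom_merge_globs base_include base_exclude cli_include cli_exclude → Spec_merge_globs base_include base_exclude cli_include cli_exclude (merge_globs base_include base_exclude cli_include cli_exclude)

-- ===== LEMMAS AND PROOFS =====

-- reference first-occurrence recursion shared by the two proofs
def ddA (l : List String) (pre : List String) : List String :=
  match l with
  | [] => []
  | v :: rest => if pre.contains v then ddA rest pre else v :: ddA rest (pre ++ [v])

-- A's repeated per-pattern rescans equal one filter against list membership.
theorem foldl_filter_eq (cli : List String) : ∀ (l : List String),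
    cli.foldl (fun ex pattern => ex.filter (fun value => value != pattern)) l
      = l.filter (fun value => !(cli.contains value)) := by
  induction cli with
  | nil => intro l; simp
  | cons p rest ih =>
      intro l
      simp only [List.foldl_cons, ih, List.filter_filter]
      congr 1
      funext v
      by_cases h : v = p <;> simp [h]

-- A's dedupe fold equals the first-occurrence recursion ddA
theorem dedupeA_eq (l : List String) : ∀ (seen : PySem.Set String) (acc : List String),
    (∀ w, w ∈ seen ↔ w ∈ acc) →
    (l.foldl
      (fun st value =>
        if PySem.Set.contains st.1 value then st
        else (PySem.Set.add st.1 value, st.2 ++ [value]))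
      (seen, acc)).2 = acc ++ ddA l acc := by
  induction l with
  | nil => intro seen acc _; simp [ddA]
  | cons v rest ih =>
      intro seen acc hinv
      rw [List.foldl_cons]
      by_cases h : v ∈ acc
      · rw [if_pos (by simp [PySem.Set.contains, (hinv v).2 h])]
        rw [ih seen acc hinv, ddA, if_pos (by simpa using h)]
      · rw [if_neg (by simp [PySem.Set.contains]; exact fun hv => h ((hinv v).1 hv))]
        rw [ih (PySem.Set.add seen v) (acc ++ [v])
              (by intro w; simp [PySem.Set.mem_add, hinv w])]
        rw [ddA, if_neg (by simpa using h)]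
        simp

-- B's comprehension over the suffix l (prefix pre already emitted) equals ddA filtered by the ban list
theorem pick_eq (banned : List String) (l : List String) : ∀ (pre S : List String),
    (∀ w, w ∈ S ↔ w ∈ pre) →
    (PySem.List.enumerate l (pre.length : Int)).filterMap (fun p =>
        if !((PySem.List.slice (pre ++ l) none (some p.1)).contains p.2)
           && !(banned.contains p.2)
        then some p.2 else none)
      = (ddA l S).filter (fun v => !(banned.contains v)) := by
  induction l with
  | nil => intro pre S _; simp [PySem.List.enumerate, ddA]
  | cons v rest ih =>
      intro pre S hs
      rw [PySem.List.enumerate_cons, List.filterMap_cons]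
      have hslice : PySem.List.slice (pre ++ v :: rest) none (some (pre.length : Int))
          = pre := by
        rw [PySem.List.slice_to_natCast]
        exact List.take_left' rfl
      have hassoc : pre ++ v :: rest = (pre ++ [v]) ++ rest := by simp
      have hlen : ((pre.length : Int) + 1) = (((pre ++ [v]).length : Nat) : Int) := by
        simp
      by_cases hp : v ∈ pre
      · have hvS : v ∈ S := (hs v).2 hp
        have htail := ih (pre ++ [v]) S (by
          intro w
          rw [hs w]
          constructor
          · intro hw; simp [hw]
          · intro hw
            rcases List.mem_append.1 hw with h1 | h1
            · exact h1
            · simpa [List.mem_singleton.1 h1] using hp)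
        rw [hlen, hassoc] at *
        simp only [ddA]
        simpa [hp, hvS, List.contains_append] using htail
      · have hvS : v ∉ S := fun hv => hp ((hs v).1 hv)
        have htail := ih (pre ++ [v]) (S ++ [v]) (by
          intro w; simp [hs w])
        rw [hlen, hassoc] at *
        simp only [ddA]
        by_cases hb : v ∈ banned
        · simpa [hp, hvS, hb, List.contains_append] using htail
        · simpa [hp, hvS, hb, List.contains_append] using htail

theorem mergePick_eq (merged banned : List String) :
    mergePick merged banned = (pyDedupe merged).filter (fun v => !(banned.contains v)) := by
  have h1 := pick_eq banned merged ([] : List String) ([] : List String)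
      (by intro w; exact Iff.rfl)
  have h2 := dedupeA_eq merged (PySem.Set.empty : PySem.Set String) ([] : List String)
      (by intro w; exact Iff.rfl)
  simp only [List.nil_append, List.length_nil, Nat.cast_zero] at h1
  unfold mergePick pyDedupe
  exact h1.trans (by rw [h2]; simp)

-- ===== VERDICT (by name: the statement is the Claim_ definition above) =====
theorem merge_globs_spec : Claim_equal_merge_globs := by
  intro bi be ci ce _
  show merge_globs bi be ci ce = merge_globs_alt bi be ci ce
  simp only [merge_globs, merge_globs_alt, mergePick_eq, foldl_filter_eq]
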